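-- pv_equiv track=rewrite | github.com/wyz-2004/CALM-Aug | calm_copy_paste_classaware.py | build_repeat_map
-- ===== SOURCE A (Python) =====
-- def build_repeat_map(counts, extreme_th=10, tail_th=50, mid_th=100,
--                      r_extreme=8, r_tail=4, r_mid=2, r_head=0):
--     rep = {}
--     for c, n in enumerate(counts):
--         if n < extreme_th:
--             rep[c] = r_extreme
--         elif n < tail_th:
--             rep[c] = r_tail
--         elif n < mid_th:
--             rep[c] = r_mid
--         else:
--             rep[c] = r_head
--     return rep
-- ===== SOURCE B (Python) =====
-- def build_repeat_map(counts, extreme_th=10, tail_th=50, mid_th=100,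
--                      r_extreme=8, r_tail=4, r_mid=2, r_head=0):
--     rep = {c: r_head for c in range(len(counts))}
--     for th, r in ((mid_th, r_mid), (tail_th, r_tail), (extreme_th, r_extreme)):
--         for c, n in enumerate(counts):
--             if n < th:
--                 rep[c] = r
--     return rep
-- ===== Notes on version B (the rewrite author's own statement) =====
-- stated objective: alternative
-- what changed: Replaces A's single pass with a per-element if/elif cascade by a staged coarse-to-fine rewrite: initialize every index to r_head, then make three whole-list overwrite passes (mid, tail, extreme) so the last pass whose threshold condition holds wins; correct because the pass order reverses the cascade's priority.
import Mathlib
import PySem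

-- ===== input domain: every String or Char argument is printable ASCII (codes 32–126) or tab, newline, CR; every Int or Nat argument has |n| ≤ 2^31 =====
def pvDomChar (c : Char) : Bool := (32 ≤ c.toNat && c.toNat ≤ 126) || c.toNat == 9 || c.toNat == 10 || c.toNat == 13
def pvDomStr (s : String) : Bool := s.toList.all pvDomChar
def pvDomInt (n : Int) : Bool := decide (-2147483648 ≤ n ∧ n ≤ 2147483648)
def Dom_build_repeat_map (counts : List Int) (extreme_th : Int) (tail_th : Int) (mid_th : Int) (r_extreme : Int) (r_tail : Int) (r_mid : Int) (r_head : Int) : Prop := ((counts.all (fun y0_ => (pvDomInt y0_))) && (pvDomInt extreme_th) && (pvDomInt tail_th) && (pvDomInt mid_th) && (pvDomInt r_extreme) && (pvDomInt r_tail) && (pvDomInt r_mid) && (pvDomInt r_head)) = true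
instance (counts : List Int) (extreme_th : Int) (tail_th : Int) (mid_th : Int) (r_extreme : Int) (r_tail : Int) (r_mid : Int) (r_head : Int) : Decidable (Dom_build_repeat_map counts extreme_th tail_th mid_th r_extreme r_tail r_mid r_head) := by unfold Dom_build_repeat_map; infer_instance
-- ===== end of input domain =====

-- B replaces A's single-pass if/elif cascade by a staged coarse-to-fine rewrite: every index starts at r_head
-- and three whole-list overwrite passes (mid, tail, extreme) let the last matching pass win (alternative).


-- ===== PORT A =====
def build_repeat_map (counts : List Int) (extreme_th : Int) (tail_th : Int) (mid_th : Int) (r_extreme : Int) (r_tail : Int) (r_mid : Int) (r_head : Int) : List (Int × Int) :=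
  ((PySem.List.enumerate counts).foldl (fun rep p =>
      rep.insert p.1
        (if p.2 < extreme_th then r_extreme
         else if p.2 < tail_th then r_tail
         else if p.2 < mid_th then r_mid
         else r_head))
    PySem.Dict.empty).items

-- ===== PORT B =====
-- rep = {c: r_head for c in range(len(counts))}; then for (th, r) in ((mid_th,r_mid),(tail_th,r_tail),(extreme_th,r_extreme)):
--   for c, n in enumerate(counts): if n < th: rep[c] = r
def build_repeat_map_alt (counts : List Int) (extreme_th : Int) (tail_th : Int) (mid_th : Int) (r_extreme : Int) (r_tail : Int) (r_mid : Int) (r_head : Int) : List (Int × Int) :=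
  (([(mid_th, r_mid), (tail_th, r_tail), (extreme_th, r_extreme)] : List (Int × Int)).foldl
      (fun rep tr =>
        (PySem.List.enumerate counts).foldl
          (fun rep p => if p.2 < tr.1 then rep.insert p.1 tr.2 else rep) rep)
      ((PySem.List.pyRange 0 counts.length 1).foldl
        (fun rep c => rep.insert c r_head) PySem.Dict.empty)).items

-- ===== PRECONDITION & SPEC =====
def Spec_build_repeat_map (counts : List Int) (extreme_th : Int) (tail_th : Int) (mid_th : Int) (r_extreme : Int) (r_tail : Int) (r_mid : Int) (r_head : Int) (out : List (Int × Int)) : Prop := out = build_repeat_map_alt counts extreme_th tail_th mid_th r_extreme r_tail r_mid r_head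
instance (counts : List Int) (extreme_th : Int) (tail_th : Int) (mid_th : Int) (r_extreme : Int) (r_tail : Int) (r_mid : Int) (r_head : Int) (out : List (Int × Int)) : Decidable (Spec_build_repeat_map counts extreme_th tail_th mid_th r_extreme r_tail r_mid r_head out) := by unfold Spec_build_repeat_map; infer_instance

-- ===== CLAIM (what is proved, stated in full; the proofs are below) =====
def Claim_equal_build_repeat_map : Prop := ∀ (counts : List Int) (extreme_th : Int) (tail_th : Int) (mid_th : Int) (r_extreme : Int) (r_tail : Int) (r_mid : Int) (r_head : Int), Dom_build_repeat_map counts extreme_th tail_th mid_th r_extreme r_tail r_mid r_head → Spec_build_repeat_map counts extreme_th tail_th mid_th r_extreme r_tail r_mid r_head (build_repeat_map counts extreme_th tail_th mid_th r_extreme r_tail r_mid r_head)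

-- ===== LEMMAS AND PROOFS =====

-- One overwrite pass over a dict whose items are exactly `pre ++ l.map (fun p => (p.1, f p))`
-- (keys Nodup, pass iterates over l) updates the l-part pointwise in place and leaves pre alone.
theorem pass_items (cond : Int × Int → Prop) [DecidablePred cond] (g : Int × Int → Int) :
    ∀ (l pre : List (Int × Int)) (f : Int × Int → Int) (d : PySem.Dict Int Int),
      d.items = pre ++ l.map (fun p => (p.1, f p)) →
      ((pre ++ l.map (fun p => (p.1, f p))).map Prod.fst).Nodup →
      (l.foldl (fun d p => if cond p then d.insert p.1 (g p) else d) d).items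
        = pre ++ l.map (fun p => (p.1, if cond p then g p else f p)) := by
  intro l
  induction l with
  | nil => intro pre f d hitems _; simpa using hitems
  | cons p t ih =>
    intro pre f d hitems hnd
    have hkey : d.contains p.1 = true := by
      rw [PySem.Dict.contains_iff_mem_keys]
      simp only [PySem.Dict.keys, hitems]
      simp
    have hnd' : (List.map Prod.fst pre ++ p.1 :: List.map Prod.fst (t.map (fun q => (q.1, f q)))).Nodup := by
      simpa [List.map_append] using hnd
    have hnotpre : p.1 ∉ pre.map Prod.fst := by
      rcases List.nodup_append.mp hnd' with ⟨-, -, hdisj⟩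
      intro hmem; exact hdisj p.1 hmem p.1 (List.mem_cons_self ..) rfl
    have hnott : p.1 ∉ (t.map (fun q => (q.1, f q))).map Prod.fst := by
      rcases List.nodup_append.mp hnd' with ⟨-, hr, -⟩
      exact (List.nodup_cons.mp hr).1
    by_cases hc : cond p
    · have hins : (d.insert p.1 (g p)).items
          = (pre ++ [(p.1, g p)]) ++ t.map (fun q => (q.1, f q)) := by
        rw [PySem.Dict.items_insert_of_contains d (g p) hkey, hitems]
        simp only [List.map_append, List.map_cons, List.append_assoc, List.cons_append,
          List.nil_append, beq_self_eq_true, if_pos]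
        congr 1
        · conv_rhs => rw [← List.map_id pre]
          apply List.map_congr_left
          intro q hq
          have hne : q.1 ≠ p.1 := fun h => hnotpre (h ▸ List.mem_map_of_mem hq)
          simp [hne]
        · congr 1
          rw [List.map_map]
          apply List.map_congr_left
          intro q hq
          have hmm : q.1 ∈ List.map Prod.fst (List.map (fun q => (q.1, f q)) t) := by
            simp only [List.map_map]
            exact List.mem_map_of_mem (f := fun r => ((r.1, f r) : Int × Int).1) hq
          have hne : q.1 ≠ p.1 := fun h => hnott (h ▸ hmm)
          simp [hne]
      have hrec := ih (pre ++ [(p.1, g p)]) f (d.insert p.1 (g p))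
        (by simpa [List.append_assoc] using hins)
        (by simpa [List.map_append] using hnd')
      simp only [List.foldl_cons, if_pos hc]
      rw [hrec]
      simp [hc, List.append_assoc]
    · have hrec := ih (pre ++ [(p.1, f p)]) f d
        (by simpa [List.append_assoc] using hitems)
        (by simpa [List.map_append] using hnd')
      simp only [List.foldl_cons, if_neg hc]
      rw [hrec]
      simp [hc, List.append_assoc]

-- The item keys of any enumerate-shaped item list are the index range, hence Nodup.
theorem nodup_enum_keys (counts : List Int) (f : Int × Int → Int) :
    ((([] : List (Int × Int)) ++ (PySem.List.enumerate counts).map (fun p => (p.1, f p))).map Prod.fst).Nodup := by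
  simp only [List.nil_append, List.map_map]
  have hcomp : (Prod.fst ∘ fun p : Int × Int => ((p.1, f p) : Int × Int)) = fun p : Int × Int => p.1 := rfl
  rw [hcomp, PySem.List.map_fst_enumerate]
  exact PySem.List.nodup_pyRange_one 0 (0 + counts.length)

-- ===== VERDICT (by name: the statement is the Claim_ definition above) =====
theorem build_repeat_map_spec : Claim_equal_build_repeat_map := by
  intro counts extreme_th tail_th mid_th r_extreme r_tail r_mid r_head _
  unfold Spec_build_repeat_map build_repeat_map build_repeat_map_alt
  -- A side: fresh, strictly increasing keys — the loop appends
  rw [PySem.Dict.items_foldl_insert_fresh]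
  · -- B side
    simp only [List.foldl_cons, List.foldl_nil]
    have hinit : ((PySem.List.pyRange 0 counts.length 1).foldl
        (fun rep c => rep.insert c r_head) PySem.Dict.empty).items
        = ([] : List (Int × Int)) ++ (PySem.List.enumerate counts).map (fun p => (p.1, r_head)) := by
      have hfresh := PySem.Dict.items_foldl_insert_fresh
        (PySem.List.pyRange 0 counts.length 1) (fun c => c) (fun _ => r_head) PySem.Dict.empty
        (fun a _ => rfl)
        (by simpa using PySem.List.nodup_pyRange_one 0 counts.length)
      rw [hfresh]
      simp only [PySem.Dict.empty, List.nil_append]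
      have hfst : (PySem.List.enumerate counts).map (fun p => p.1) = PySem.List.pyRange 0 counts.length 1 := by
        simpa using PySem.List.map_fst_enumerate counts 0
      rw [← hfst, List.map_map]
      rfl
    have h1 := pass_items (fun p => p.2 < mid_th) (fun _ => r_mid)
      (PySem.List.enumerate counts) [] (fun _ => r_head) _ hinit (nodup_enum_keys counts _)
    have h2 := pass_items (fun p => p.2 < tail_th) (fun _ => r_tail)
      (PySem.List.enumerate counts) [] (fun p => if p.2 < mid_th then r_mid else r_head) _ h1 (nodup_enum_keys counts _)
    have h3 := pass_items (fun p => p.2 < extreme_th) (fun _ => r_extreme)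
      (PySem.List.enumerate counts) []
      (fun p => if p.2 < tail_th then r_tail else if p.2 < mid_th then r_mid else r_head) _ h2 (nodup_enum_keys counts _)
    rw [h3]
    simp [PySem.Dict.empty]
  · intro a _; rfl
  · have h := PySem.List.pairwise_lt_enumerate (xs := counts) (s := 0)
    exact (List.pairwise_map.mpr h).imp (fun hlt => by omega)
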